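-- pv_equiv track=rewrite | github.com/haongnd2280/DataStruc-AlgoPython | Chapter 6. Stacks, Queues and Dequeues/Matching Tags.py | is_matched_html
-- ===== SOURCE A (Python) =====
-- class ArrayStack:
-- 	"""LIFO Stack implementation using a Python list as underlying storage."""
--
-- 	def __init__(self):
-- 		"""Create an empty stack."""
-- 		self._data = []  # nonpublic list instance
--
-- 	def __len__(self):
-- 		"""Return the number of elements in the stack."""
-- 		return len(self._data)
--
-- 	def is_empty(self):
-- 		"""Return True if the stack is empty."""
-- 		return len(self._data) == 0
--
-- 	def push(self, e):
-- 		"""Add element e to the top of the stack."""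
-- 		self._data.append(e)  # new item stored at the end of list
--
-- 	def top(self):
-- 		"""Return (but not remove) the element at the top of the stack.
--
-- 		Raise Empty exception if the stack is empty.
-- 		"""
-- 		if self.is_empty():
-- 			raise Empty('Stack is empty.')
-- 		return self._data[-1]  # the last item in the list.
--
-- 	def pop(self):
-- 		"""Remove and return the element from the top of the stack (i.e, LIFO).
--
-- 		Raise Empty exception if the stack is empty.
-- 		"""
-- 		if self.is_empty():
-- 			raise Empty('Stack is empty.')
-- 		return self._data.pop()  # remove last item from list.
--
-- def is_matched_html(raw):
-- 	"""Return True if all HTML tags are properly matched; False otherwise."""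
-- 	S = ArrayStack()
-- 	j = raw.find('<')                   # find first '<' character (if any)
-- 	while j != -1:
-- 		k = raw.find('>', j + 1)        # find next '>' character
-- 		if k == -1:                     # no '>' character exists
-- 			return False                # invalid tag
--
-- 		tag = raw[j + 1:k]              # strip away < >
-- 		if not tag.startswith('/'):     # this is opening tag
-- 			S.push(tag)
-- 		else:                           # this is closing tag
-- 			if S.is_empty():
-- 				return False            # nothing to match with
-- 			elif tag[1:] != S.pop():    # remove '/' character
-- 				return False            # mismatched delimiter
--
-- 		j = raw.find('<', k + 1)        # find next '<' character (if any)
--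
-- 	return S.is_empty()
-- ===== SOURCE B (Python) =====
-- def is_matched_html(raw):
--     """Return True if all HTML tags are properly matched; False otherwise."""
--     # Pass 1: extract all tag strings; reject an unclosed '<'.
--     tags = []
--     j = raw.find('<')
--     while j != -1:
--         k = raw.find('>', j + 1)
--         if k == -1:
--             return False
--         tags.append(raw[j + 1:k])
--         j = raw.find('<', k + 1)
--     # Pass 2: validate the token list with a plain list as a stack.
--     stack = []
--     for tag in tags:
--         if tag.startswith('/'):
--             if not stack or stack.pop() != tag[1:]:
--                 return False
--         else:
--             stack.append(tag)
--     return not stack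
-- ===== Notes on version B (the rewrite author's own statement) =====
-- stated objective: alternative
-- what changed: A's single interleaved scan that validates tags against an ArrayStack as it finds them is split into two differently-shaped passes: a tokenizer that extracts the full list of tag strings (failing on an unclosed '<'), then a separate validation of that token list with a plain list used as a stack.
import Mathlib
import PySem

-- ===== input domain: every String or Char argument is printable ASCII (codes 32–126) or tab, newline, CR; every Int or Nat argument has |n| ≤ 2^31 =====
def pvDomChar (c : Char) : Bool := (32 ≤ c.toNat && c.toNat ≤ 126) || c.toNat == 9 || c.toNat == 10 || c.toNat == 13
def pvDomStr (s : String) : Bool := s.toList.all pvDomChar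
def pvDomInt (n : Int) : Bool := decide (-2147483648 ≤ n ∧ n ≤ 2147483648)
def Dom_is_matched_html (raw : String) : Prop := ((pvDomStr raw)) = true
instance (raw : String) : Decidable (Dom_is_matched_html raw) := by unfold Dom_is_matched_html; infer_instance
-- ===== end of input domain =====

-- B re-decomposes A's single interleaved scan-with-stack into two passes: a tokenizer that
-- extracts all tag strings (rejecting an unclosed '<'), then a separate stack validation of
-- that token list (objective: alternative decomposition; same cost).

-- ===== PORT A =====
-- A's while-loop: j is the index of the current '<' (or -1), the stack holds open tags
-- (head = top, mirroring ArrayStack's list end). fuel only makes the recursion total: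
-- each iteration advances j by at least 2, so s.length + 1 iterations always suffice.
def isMatchedLoopA (s : List Char) (stack : List (List Char)) (j : Int) : Nat → Bool
  | 0 => false
  | fuel + 1 =>
    if j = -1 then stack.isEmpty
    else
      let k := PySem.Chars.findFrom s ['>'] (j + 1) none
      if k = -1 then false
      else
        let tag := PySem.Chars.slice s (some (j + 1)) (some k)
        if ¬ PySem.Chars.startswith tag ['/'] then    -- opening tag: push
          isMatchedLoopA s (tag :: stack) (PySem.Chars.findFrom s ['<'] (k + 1) none) fuel
        else
          match stack with
          | [] => false                                -- nothing to match with
          | top :: rest =>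
            if PySem.Chars.slice tag (some 1) none ≠ top then false   -- mismatched delimiter
            else isMatchedLoopA s rest (PySem.Chars.findFrom s ['<'] (k + 1) none) fuel

def is_matched_html (raw : String) : Bool :=
  let s := raw.toList
  isMatchedLoopA s [] (PySem.Chars.find s ['<']) (s.length + 1)

-- ===== PORT B =====
-- Pass 1: collect the tag strings left to right; none = some '<' has no following '>'.
def tokenizeTags (s : List Char) (j : Int) : Nat → Option (List (List Char))
  | 0 => none
  | fuel + 1 =>
    if j = -1 then some []
    else
      let k := PySem.Chars.findFrom s ['>'] (j + 1) none
      if k = -1 then none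
      else
        match tokenizeTags s (PySem.Chars.findFrom s ['<'] (k + 1) none) fuel with
        | none => none
        | some ts => some (PySem.Chars.slice s (some (j + 1)) (some k) :: ts)

-- Pass 2: fold the token list through a plain list used as a stack (head = top).
def validateTags : List (List Char) → List (List Char) → Bool
  | [], stack => stack.isEmpty
  | tag :: ts, stack =>
    if PySem.Chars.startswith tag ['/'] then
      match stack with
      | [] => false
      | top :: rest =>
        if top ≠ PySem.Chars.slice tag (some 1) none then false
        else validateTags ts rest
    else validateTags ts (tag :: stack)

def is_matched_html_alt (raw : String) : Bool :=
  let s := raw.toList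
  match tokenizeTags s (PySem.Chars.find s ['<']) (s.length + 1) with
  | none => false
  | some ts => validateTags ts []

-- ===== PRECONDITION & SPEC =====
def Spec_is_matched_html (raw : String) (out : Bool) : Prop := out = is_matched_html_alt raw
instance (raw : String) (out : Bool) : Decidable (Spec_is_matched_html raw out) := by unfold Spec_is_matched_html; infer_instance

-- ===== CLAIM (what is proved, stated in full; the proofs are below) =====
def Claim_equal_is_matched_html : Prop := ∀ (raw : String), Dom_is_matched_html raw → Spec_is_matched_html raw (is_matched_html raw)

-- ===== LEMMAS AND PROOFS =====

-- A's interleaved loop equals "tokenize, then validate" for every fuel, start index and stack.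
theorem loopA_eq_tokenize_validate (s : List Char) :
    ∀ (fuel : Nat) (j : Int) (stack : List (List Char)),
      isMatchedLoopA s stack j fuel =
        (match tokenizeTags s j fuel with
         | none => false
         | some ts => validateTags ts stack) := by
  intro fuel
  induction fuel with
  | zero => intro j stack; simp [isMatchedLoopA, tokenizeTags]
  | succ n ih =>
    intro j stack
    by_cases hj : j = -1
    · simp [isMatchedLoopA, tokenizeTags, hj, validateTags]
    · by_cases hk : PySem.Chars.findFrom s ['>'] (j + 1) none = -1
      · simp [isMatchedLoopA, tokenizeTags, hj, hk]
      · by_cases hs : PySem.Chars.startswith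
            (PySem.List.slice s (some (j + 1))
              (some (PySem.Chars.findFrom s ['>'] (j + 1) none))) ['/'] = true
        · cases stack with
          | nil =>
            simp only [isMatchedLoopA, tokenizeTags, if_neg hj, if_neg hk]
            cases tokenizeTags s
                (PySem.Chars.findFrom s ['<']
                  ((PySem.Chars.findFrom s ['>'] (j + 1) none) + 1) none) n with
            | none => simp [hs]
            | some ts => simp [validateTags, hs]
          | cons top rest =>
            by_cases hm : top = PySem.List.slice
                (PySem.List.slice s (some (j + 1))
                  (some (PySem.Chars.findFrom s ['>'] (j + 1) none))) (some 1) none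
            · -- matching closing tag: both recurse
              simp only [isMatchedLoopA, tokenizeTags, if_neg hj, if_neg hk]
              simp only [ih]
              cases tokenizeTags s
                  (PySem.Chars.findFrom s ['<']
                    ((PySem.Chars.findFrom s ['>'] (j + 1) none) + 1) none) n with
              | none => simp [hs, hm]
              | some ts => simp [validateTags, hs, ← hm]
            · simp only [isMatchedLoopA, tokenizeTags, if_neg hj, if_neg hk]
              cases tokenizeTags s
                  (PySem.Chars.findFrom s ['<']
                    ((PySem.Chars.findFrom s ['>'] (j + 1) none) + 1) none) n with
              | none => simp [hs, Ne.symm hm]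
              | some ts => simp [validateTags, hs, hm, Ne.symm hm]
        · -- opening tag: both push and recurse
          simp only [isMatchedLoopA, tokenizeTags, if_neg hj, if_neg hk]
          simp only [ih]
          cases tokenizeTags s
              (PySem.Chars.findFrom s ['<']
                ((PySem.Chars.findFrom s ['>'] (j + 1) none) + 1) none) n with
          | none => simp [hs]
          | some ts => simp [validateTags, hs]

-- ===== VERDICT (by name: the statement is the Claim_ definition above) =====
theorem is_matched_html_spec : Claim_equal_is_matched_html := by
  intro raw _
  unfold Spec_is_matched_html is_matched_html is_matched_html_alt
  exact loopA_eq_tokenize_validate raw.toList (raw.toList.length + 1)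
    (PySem.Chars.find raw.toList ['<']) []
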